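-- pv_equiv track=rewrite | github.com/JackLong886/automatic-waffle | DOM_Process/dataloader.py | block_img
-- ===== SOURCE A (Python) =====
-- def block_img(width, height, block_size):
--     frame = []
--     x = 0
--     y = 0
--     while y < height:  # 高度方向滑窗
--         if y + block_size >= height:
--             yoff = y
--             ysize = height - y
--             y_end = True
--         else:
--             yoff = y
--             ysize = block_size
--             y_end = False
--
--         while x < width:  # 宽度方向滑窗
--             if x + block_size >= width:
--                 xoff = x
--                 xsize = width - x
--                 x_end = True
--             else:
--                 xoff = x
--                 xsize = block_size
--                 x_end = False
--             frame.append([xoff, yoff, xsize, ysize])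
--             x += block_size
--             if x_end:
--                 break
--         y += block_size
--         x = 0
--         if y_end:
--             break
--     return frame
-- ===== SOURCE B (Python) =====
-- def block_img(width, height, block_size):
--     # Flat index-arithmetic enumeration: count blocks per axis in closed form
--     # (ceiling division), then one loop over the flat block index k, recovering
--     # the grid cell (row, col) with divmod.
--     nx = max(0, -(-width // block_size))
--     ny = max(0, -(-height // block_size))
--     frame = []
--     for k in range(nx * ny):
--         i, j = divmod(k, nx)
--         x = j * block_size
--         y = i * block_size
--         frame.append([x, y, min(block_size, width - x), min(block_size, height - y)])
--     return frame
-- ===== Notes on version B (the rewrite author's own statement) =====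
-- stated objective: alternative
-- what changed: Replaces A's coupled nested sentinel while-loops (break flags x_end/y_end, manual cursor reset) by a closed-form block count per axis (ceiling division) and a single flat loop over the block index k, recovering the grid cell with divmod.
-- outside the precondition, e.g. on block_img(5, -2, 0): A returns [], B raises ZeroDivisionError
import Mathlib
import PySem

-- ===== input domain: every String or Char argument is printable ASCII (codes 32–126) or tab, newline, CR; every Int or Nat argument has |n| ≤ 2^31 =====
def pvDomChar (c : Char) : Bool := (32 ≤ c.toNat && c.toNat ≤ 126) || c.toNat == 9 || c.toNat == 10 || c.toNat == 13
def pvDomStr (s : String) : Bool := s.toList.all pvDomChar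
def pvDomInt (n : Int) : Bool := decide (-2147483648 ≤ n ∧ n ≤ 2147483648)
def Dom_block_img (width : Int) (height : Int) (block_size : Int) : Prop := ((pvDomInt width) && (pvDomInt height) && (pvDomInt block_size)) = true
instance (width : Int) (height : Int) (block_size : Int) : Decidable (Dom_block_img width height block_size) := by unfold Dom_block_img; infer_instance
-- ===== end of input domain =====

-- B replaces A's coupled nested sentinel while-loops by a closed-form per-axis block
-- count (ceiling division) and a single flat loop over the block index with divmod
-- (objective: alternative decomposition, same cost).

-- ===== PORT A =====
-- A's inner while-loop over x (with its break flag x_end); fuel stands for the loop's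
-- unbounded 'while' — inside Pre_ (block_size > 0) the supplied fuel is never exhausted.
def blockImgInnerA (width block_size yoff ysize : Int) : Nat → Int → List (List Int) → List (List Int)
  | 0, _, frame => frame
  | Nat.succ f, x, frame =>
    if x < width then
      let p := if x + block_size ≥ width then (x, width - x, true) else (x, block_size, false)
      let frame := frame ++ [[p.1, yoff, p.2.1, ysize]]
      let x := x + block_size
      if p.2.2 then frame else blockImgInnerA width block_size yoff ysize f x frame
    else frame

-- A's outer while-loop over y (with its break flag y_end), resetting x to 0 each row.
def blockImgOuterA (width height block_size : Int) : Nat → Int → List (List Int) → List (List Int)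
  | 0, _, frame => frame
  | Nat.succ f, y, frame =>
    if y < height then
      let q := if y + block_size ≥ height then (y, height - y, true) else (y, block_size, false)
      let frame := blockImgInnerA width block_size q.1 q.2.1 (width.toNat + 1) 0 frame
      let y := y + block_size
      if q.2.2 then frame else blockImgOuterA width height block_size f y frame
    else frame

def block_img (width : Int) (height : Int) (block_size : Int) : List (List Int) :=
  blockImgOuterA width height block_size (height.toNat + 1) 0 []

-- ===== PORT B =====
-- nx = max(0, -(-width // block_size)), ny likewise; one flat loop over k in
-- range(nx * ny) recovering (i, j) = divmod(k, nx).
def block_img_alt (width : Int) (height : Int) (block_size : Int) : List (List Int) :=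
  let nx := max 0 (-(PySem.Int.floordiv (-width) block_size))
  let ny := max 0 (-(PySem.Int.floordiv (-height) block_size))
  (PySem.List.pyRange 0 (nx * ny) 1).foldl (fun frame k =>
    let i := PySem.Int.floordiv k nx
    let j := PySem.Int.mod k nx
    let x := j * block_size
    let y := i * block_size
    frame ++ [[x, y, min block_size (width - x), min block_size (height - y)]]) []

-- ===== PRECONDITION & SPEC =====
-- Pre_ excludes non-positive block_size, which is outside the function's natural domain:
-- there A diverges whenever height > 0, and returns [] only via the degenerate height ≤ 0
-- case, while B's ceiling division raises ZeroDivisionError for 0 (negative block sizes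
-- may also return differently).
def Pre_block_img (width : Int) (height : Int) (block_size : Int) : Prop := 0 < block_size
instance (width : Int) (height : Int) (block_size : Int) : Decidable (Pre_block_img width height block_size) := by unfold Pre_block_img; infer_instance
def pvWitness_block_img : Int × Int × Int := (10, 7, 3)

def Spec_block_img (width : Int) (height : Int) (block_size : Int) (out : List (List Int)) : Prop := out = block_img_alt width height block_size
instance (width : Int) (height : Int) (block_size : Int) (out : List (List Int)) : Decidable (Spec_block_img width height block_size out) := by unfold Spec_block_img; infer_instance

-- ===== CLAIM (what is proved, stated in full; the proofs are below) =====
def Claim_equal_block_img : Prop := ∀ (width : Int) (height : Int) (block_size : Int), Dom_block_img width height block_size → Pre_block_img width height block_size → Spec_block_img width height block_size (block_img width height block_size)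

-- ===== LEMMAS AND PROOFS =====

theorem pyRange_pos_nil (a b s : Int) (hs : 0 < s) (h : b ≤ a) :
    PySem.List.pyRange a b s = [] := by
  rw [PySem.List.pyRange_of_pos a b hs]
  simp [show ¬ a < b by omega]

theorem pyRange_pos_cons (a b s : Int) (hs : 0 < s) (h : a < b) :
    PySem.List.pyRange a b s = a :: PySem.List.pyRange (a + s) b s := by
  rw [PySem.List.pyRange_of_pos a b hs, PySem.List.pyRange_of_pos (a + s) b hs]
  have hsplit : ((b - a + s - 1) / s).toNat
      = (if a + s < b then ((b - (a + s) + s - 1) / s).toNat else 0) + 1 := by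
    split_ifs with hlt
    · have he : b - a + s - 1 = (b - (a + s) + s - 1) + 1 * s := by ring
      rw [he, Int.add_mul_ediv_right _ 1 (by omega : s ≠ 0)]
      have h0 : 0 ≤ (b - (a + s) + s - 1) / s :=
        Int.ediv_nonneg (by omega) (by omega)
      omega
    · have h1 : (b - a + s - 1) / s = 1 := by
        have hle : 1 ≤ (b - a + s - 1) / s := by
          rw [Int.le_ediv_iff_mul_le hs]; omega
        have hlt2 : (b - a + s - 1) / s < 2 := by
          rw [Int.ediv_lt_iff_lt_mul hs]; omega
        omega
      simp [h1]
  rw [if_pos h, hsplit, List.range_succ_eq_map, List.map_cons, List.map_map]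
  congr 1
  · simp
  · apply List.map_congr_left
    intro k _
    simp [Nat.succ_eq_add_one]
    ring

theorem inner_eq (width block_size yoff ysize : Int) (hs : 0 < block_size) :
    ∀ (f : Nat) (x : Int) (frame : List (List Int)), (width - x).toNat < f →
      blockImgInnerA width block_size yoff ysize f x frame
        = frame ++ (PySem.List.pyRange x width block_size).map
            (fun xv => [xv, yoff, min block_size (width - xv), ysize]) := by
  intro f
  induction f with
  | zero => intro x frame hf; omega
  | succ f ih =>
    intro x frame hf
    by_cases hx : x < width
    · rw [pyRange_pos_cons x width block_size hs hx]
      by_cases hend : x + block_size ≥ width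
      · have hnil : PySem.List.pyRange (x + block_size) width block_size = [] :=
          pyRange_pos_nil _ _ _ hs (by omega)
        simp only [blockImgInnerA, if_pos hx, if_pos hend, hnil]
        simp [show min block_size (width - x) = width - x by omega]
      · have hmin : min block_size (width - x) = block_size := by omega
        simp only [blockImgInnerA, if_pos hx, if_neg hend]
        rw [ih (x + block_size) _ (by omega)]
        simp [hmin]
    · rw [pyRange_pos_nil x width block_size hs (by omega)]
      simp [blockImgInnerA, hx]

theorem outer_eq (width height block_size : Int) (hs : 0 < block_size) :
    ∀ (f : Nat) (y : Int) (frame : List (List Int)), (height - y).toNat < f →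
      blockImgOuterA width height block_size f y frame
        = frame ++ (PySem.List.pyRange y height block_size).flatMap
            (fun yv => (PySem.List.pyRange 0 width block_size).map
              (fun xv => [xv, yv, min block_size (width - xv), min block_size (height - yv)])) := by
  intro f
  induction f with
  | zero => intro y frame hf; omega
  | succ f ih =>
    intro y frame hf
    by_cases hy : y < height
    · rw [pyRange_pos_cons y height block_size hs hy]
      by_cases hend : y + block_size ≥ height
      · have hnil : PySem.List.pyRange (y + block_size) height block_size = [] :=
          pyRange_pos_nil _ _ _ hs (by omega)
        simp only [blockImgOuterA, if_pos hy, if_pos hend, hnil]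
        rw [inner_eq width block_size y (height - y) hs (width.toNat + 1) 0 frame (by omega)]
        simp [show min block_size (height - y) = height - y by omega]
      · have hmin : min block_size (height - y) = block_size := by omega
        simp only [blockImgOuterA, if_pos hy, if_neg hend]
        rw [inner_eq width block_size y block_size hs (width.toNat + 1) 0 frame (by omega)]
        rw [ih (y + block_size) _ (by omega)]
        simp [hmin]
    · rw [pyRange_pos_nil y height block_size hs (by omega)]
      simp [blockImgOuterA, hy]

-- The 1-D tiling of [0, len) by step b, expressed through B's ceiling-division count.
theorem tiles1 (len b : Int) (hs : 0 < b) :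
    PySem.List.pyRange 0 len b
      = (List.range (max 0 (-(PySem.Int.floordiv (-len) b))).toNat).map
          (fun k : Nat => (k : Int) * b) := by
  rw [PySem.Int.floordiv_eq_ediv_of_pos hs, PySem.List.pyRange_of_pos 0 len hs]
  by_cases hl : 0 < len
  · have hc1 : (len - 0 + b - 1) / b ≤ -(-len / b) := by
      have : -len / b < -((len - 0 + b - 1) / b) + 1 := by
        rw [Int.ediv_lt_iff_lt_mul hs]
        have h2 : (len - 0 + b - 1) / b * b ≤ len - 0 + b - 1 := by
          have := Int.le_ediv_iff_mul_le (a := (len - 0 + b - 1) / b)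
            (b := len - 0 + b - 1) hs
          exact this.mp le_rfl
        nlinarith [h2]
      omega
    have hc2 : -(-len / b) ≤ (len - 0 + b - 1) / b := by
      have : -((len - 0 + b - 1) / b) ≤ -len / b := by
        rw [Int.le_ediv_iff_mul_le hs]
        have h3 : len - 0 + b - 1 < ((len - 0 + b - 1) / b + 1) * b := by
          have := Int.ediv_lt_iff_lt_mul (a := len - 0 + b - 1)
            (b := (len - 0 + b - 1) / b + 1) hs
          exact this.mp (by omega)
        nlinarith [h3]
      omega
    have hcpos : 1 ≤ (len - 0 + b - 1) / b :=
      (Int.le_ediv_iff_mul_le hs).mpr (by omega)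
    rw [if_pos hl, show max 0 (-(-len / b)) = (len - 0 + b - 1) / b by omega]
    simp [mul_comm]
  · have h0 : 0 ≤ -len / b := Int.ediv_nonneg (by omega) (by omega)
    rw [if_neg hl, show max 0 (-(-len / b)) = 0 by omega]
    simp

-- foldl that appends one element per step is a map.
theorem foldl_push {α β : Type} (f : α → List β) :
    ∀ (l : List α) (acc : List β),
      l.foldl (fun a k => a ++ f k) acc = acc ++ l.flatMap f := by
  intro l
  induction l with
  | nil => intro acc; simp
  | cons x xs ih => intro acc; simp [List.foldl_cons, ih, List.flatMap_cons]

-- Row-major flat enumeration with divmod equals the nested enumeration.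
theorem rowmajor {α : Type} (g : Nat → Nat → α) :
    ∀ (ny nx : Nat),
      (List.range (ny * nx)).map (fun k => g (k / nx) (k % nx))
        = (List.range ny).flatMap (fun i => (List.range nx).map (fun j => g i j)) := by
  intro ny
  induction ny with
  | zero => intro nx; simp
  | succ ny ih =>
    intro nx
    rcases Nat.eq_zero_or_pos nx with hnx | hnx
    · subst hnx; simp
    · rw [show (ny + 1) * nx = ny * nx + nx by ring, List.range_add, List.map_append,
        List.map_map, ih, List.range_succ, List.flatMap_append]
      congr 1
      simp only [List.flatMap_cons, List.flatMap_nil, List.append_nil]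
      apply List.map_congr_left
      intro j hj
      have hjlt : j < nx := List.mem_range.mp hj
      have hdiv : (ny * nx + j) / nx = ny := by
        rw [Nat.mul_comm, Nat.mul_add_div hnx, Nat.div_eq_of_lt hjlt]
        omega
      have hmod : (ny * nx + j) % nx = j := by
        rw [Nat.add_comm, Nat.add_mul_mod_self_right, Nat.mod_eq_of_lt hjlt]
      simp only [Function.comp_apply]
      rw [hdiv, hmod]

def cell (width height block_size : Int) (i j : Int) : List Int :=
  [j * block_size, i * block_size,
   min block_size (width - j * block_size), min block_size (height - i * block_size)]

theorem flatMap_eq_map {a b : Type} (f : a -> List b) (g : a -> b) :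
    forall (l : List a), (forall k, k ∈ l -> f k = [g k]) -> l.flatMap f = l.map g := by
  intro l
  induction l with
  | nil => intro _; rfl
  | cons x xs ih =>
    intro h
    rw [List.flatMap_cons, List.map_cons, h x (List.mem_cons_self), ih (fun k hk => h k (List.mem_cons_of_mem _ hk))]
    rfl

-- B's single flat loop, as a nested nat-range enumeration of cells.
theorem flatloop_eq (width height block_size nx ny : Int) (hnx : 0 ≤ nx) (hny : 0 ≤ ny) :
    ((PySem.List.pyRange 0 (nx * ny) 1).foldl (fun frame k =>
        frame ++ [[PySem.Int.mod k nx * block_size, PySem.Int.floordiv k nx * block_size,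
                   min block_size (width - PySem.Int.mod k nx * block_size),
                   min block_size (height - PySem.Int.floordiv k nx * block_size)]]) [])
      = (List.range ny.toNat).flatMap (fun (i : Nat) => (List.range nx.toNat).map
          (fun (j : Nat) => cell width height block_size (i : Int) (j : Int))) := by
  have hmc : ((ny.toNat * nx.toNat : Nat) : Int) = nx * ny := by
    push_cast
    rw [Int.toNat_of_nonneg hnx, Int.toNat_of_nonneg hny]
    ring
  have hc : (nx * ny - 0).toNat = ny.toNat * nx.toNat := by
    rw [Int.sub_zero, ← hmc, Int.toNat_natCast]
  rw [foldl_push, List.nil_append, PySem.List.pyRange_one, List.flatMap_map, hc]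
  refine (flatMap_eq_map _
      (fun k : Nat => cell width height block_size ((k / nx.toNat : Nat) : Int) ((k % nx.toNat : Nat) : Int))
      _ ?_).trans
    (rowmajor (fun i j : Nat => cell width height block_size (i : Int) (j : Int)) ny.toNat nx.toNat)
  intro k _
  have hnxc : nx = ((nx.toNat : Nat) : Int) := (Int.toNat_of_nonneg hnx).symm
  simp only [zero_add]
  rw [hnxc, PySem.Int.mod_natCast, PySem.Int.floordiv_natCast]
  rfl

theorem alt_eq (width height block_size : Int) (hs : 0 < block_size) :
    block_img_alt width height block_size
      = (PySem.List.pyRange 0 height block_size).flatMap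
          (fun yv => (PySem.List.pyRange 0 width block_size).map
            (fun xv => [xv, yv, min block_size (width - xv), min block_size (height - yv)])) := by
  simp only [block_img_alt]
  rw [flatloop_eq width height block_size _ _ (le_max_left _ _) (le_max_left _ _)]
  rw [tiles1 width block_size hs, tiles1 height block_size hs, List.flatMap_map]
  simp only [List.map_map]
  rfl

-- ===== VERDICT (by name: the statement is the Claim_ definition above) =====
theorem block_img_spec : Claim_equal_block_img := by
  intro width height block_size _ hpre
  unfold Spec_block_img block_img
  rw [outer_eq width height block_size hpre (height.toNat + 1) 0 [] (by omega)]
  rw [alt_eq width height block_size hpre]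
  simp
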